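-- pv_equiv track=rewrite | github.com/Tprkgn/BasicPython | HW2_-_All_Solutions.py | remove_even_length
-- ===== SOURCE A (Python) =====
-- def remove_even_length(list):
--     temp = []
--     for i in range(len(list)):
--         if len(list[i]) % 2 == 0:
--             temp.append(list[i])
--     for i in temp:
--         list.remove(i)
--     return list
-- ===== SOURCE B (Python) =====
-- def remove_even_length(list):
--     # Single-pass filter keeping odd-length strings; mutates the argument in
--     # place (like A) and returns it.
--     list[:] = [s for s in list if len(s) % 2 != 0]
--     return list
-- ===== Notes on version B (the rewrite author's own statement) =====
-- stated objective: faster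
-- what changed: A collects the even-length strings and then calls list.remove for each (a linear scan per removal); B keeps the odd-length strings in one comprehension pass.
import Mathlib
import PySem

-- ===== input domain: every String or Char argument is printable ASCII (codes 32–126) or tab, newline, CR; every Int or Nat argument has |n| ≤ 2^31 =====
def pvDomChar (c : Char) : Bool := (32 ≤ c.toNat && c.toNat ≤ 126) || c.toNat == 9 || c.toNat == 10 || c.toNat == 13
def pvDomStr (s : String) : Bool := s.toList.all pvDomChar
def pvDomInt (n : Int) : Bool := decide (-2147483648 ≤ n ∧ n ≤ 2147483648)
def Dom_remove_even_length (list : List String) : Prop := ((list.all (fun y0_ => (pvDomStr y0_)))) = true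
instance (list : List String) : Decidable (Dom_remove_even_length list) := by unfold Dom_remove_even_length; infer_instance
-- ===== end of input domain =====

-- B replaces A's collect-evens-then-list.remove-each quadratic scheme by a single filter
-- pass keeping odd-length strings (objective: faster). A mutates its argument in place;
-- B performs the equivalent in-place update; the equivalence proved is about the return value.


-- ===== PORT A =====
-- temp = []; for i in range(len(list)): if len(list[i]) % 2 == 0: temp.append(list[i])
-- for i in temp: list.remove(i); return list
-- pyGet? never misses (i ∈ range(len)), so '.getD ""' is unreachable; list.remove never
-- raises here (each temp element is still present), so '.getD acc' is unreachable.
def remove_even_length (list : List String) : List String :=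
  let temp : List String :=
    (PySem.List.pyRange 0 (PySem.List.len list) 1).foldl
      (fun temp i =>
        if PySem.Int.mod (PySem.Str.len (PySem.List.pyGetD list i "")) 2 == 0 then
          temp ++ [PySem.List.pyGetD list i ""]
        else temp) []
  temp.foldl (fun l i => (PySem.List.remove? l i).getD l) list

-- ===== PORT B =====
-- return [s for s in list if len(s) % 2 != 0]  (written back into list in place)
def remove_even_length_alt (list : List String) : List String :=
  list.filter (fun s => !(PySem.Int.mod (PySem.Str.len s) 2 == 0))

-- ===== PRECONDITION & SPEC =====
def Spec_remove_even_length (list : List String) (out : List String) : Prop := out = remove_even_length_alt list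
instance (list : List String) (out : List String) : Decidable (Spec_remove_even_length list out) := by unfold Spec_remove_even_length; infer_instance

-- ===== CLAIM (what is proved, stated in full; the proofs are below) =====
def Claim_equal_remove_even_length : Prop := ∀ (list : List String), Dom_remove_even_length list → Spec_remove_even_length list (remove_even_length list)

-- ===== LEMMAS AND PROOFS =====

-- Removing an element distinct from the head commutes with cons.
theorem pv_foldl_remove_cons (x : String) :
    ∀ (ts acc : List String), (∀ t ∈ ts, t ≠ x) →
      ts.foldl (fun l i => (PySem.List.remove? l i).getD l) (x :: acc)
        = x :: ts.foldl (fun l i => (PySem.List.remove? l i).getD l) acc := by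
  intro ts
  induction ts with
  | nil => intro acc _; rfl
  | cons t ts ih =>
    intro acc h
    have hne : x ≠ t := fun e => h t (by simp) e.symm
    simp only [List.foldl_cons]
    rw [PySem.List.remove?_cons_of_ne acc hne]
    cases hr : PySem.List.remove? acc t with
    | none => simp [ih acc (fun u hu => h u (by simp [hu]))]
    | some r => simp [ih r (fun u hu => h u (by simp [hu]))]

-- Removing (first occurrences of) all p-elements of l from l leaves exactly the ¬p-elements.
theorem pv_remove_all (p : String → Bool) :
    ∀ (l : List String),
      (l.filter p).foldl (fun acc t => (PySem.List.remove? acc t).getD acc) l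
        = l.filter (fun s => !p s) := by
  intro l
  induction l with
  | nil => rfl
  | cons x xs ih =>
    by_cases hp : p x = true
    · simp only [List.filter_cons, hp, if_pos, List.foldl_cons,
        PySem.List.remove?_cons_self, Option.getD_some]
      simpa [List.filter_cons, hp] using ih
    · have hxs : ∀ t ∈ xs.filter p, t ≠ x := by
        intro t ht he
        exact hp (he ▸ (List.of_mem_filter ht))
      rw [show (x :: xs).filter p = xs.filter p by simp [hp]]
      rw [pv_foldl_remove_cons x (xs.filter p) xs hxs, ih]
      simp [hp]

-- ===== VERDICT (by name: the statement is the Claim_ definition above) =====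
theorem remove_even_length_spec : Claim_equal_remove_even_length := by
  intro list _
  unfold Spec_remove_even_length remove_even_length remove_even_length_alt
  have htemp :
      (PySem.List.pyRange 0 (PySem.List.len list) 1).foldl
        (fun temp i =>
          if PySem.Int.mod (PySem.Str.len (PySem.List.pyGetD list i "")) 2 == 0 then
            temp ++ [PySem.List.pyGetD list i ""]
          else temp) []
        = list.filter (fun s => PySem.Int.mod (PySem.Str.len s) 2 == 0) := by
    rw [show (PySem.List.len list) = ((list.length : Int)) from rfl]
    rw [PySem.List.foldl_pyRange_zero_pyGetD' list ""
      (fun temp s => if PySem.Int.mod (PySem.Str.len s) 2 == 0 then temp ++ [s] else temp) []]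
    exact PySem.List.foldl_append_if_eq_filter _ _ _
  simp only [htemp]
  exact pv_remove_all _ list
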